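-- pv_equiv track=rewrite | github.com/atoye1/Programmers | 프로그래머스/lv1/42862. 체육복/체육복.py | solution
-- ===== SOURCE A (Python) =====
-- def solution(n, lost, reserve):
--     net_lost = [i for i in lost if i not in reserve]
--     net_reserve = [i for i in reserve if i not in lost]
--
--     net_lost.sort()
--     net_reserve.sort()
--     saved = 0
--     p1, p2 = (0, 0)
--     while p1 < len(net_lost) and p2 < len(net_reserve):
--         if abs(net_lost[p1] - net_reserve[p2]) <= 1:
--             p1 += 1
--             p2 += 1
--             saved += 1
--         elif net_lost[p1] > net_reserve[p2]:
--             p2 += 1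
--         else:
--             p1 += 1
--
--     return n - len(net_lost) + saved
-- ===== SOURCE B (Python) =====
-- def solution(n, lost, reserve):
--     net_lost = sorted(i for i in lost if i not in reserve)
--     total = len(net_lost)
--     saved = 0
--     for r in sorted(i for i in reserve if i not in lost):
--         if r - 1 in net_lost:
--             net_lost.remove(r - 1)
--             saved += 1
--         elif r + 1 in net_lost:
--             net_lost.remove(r + 1)
--             saved += 1
--     return n - total + saved
-- ===== Notes on version B (the rewrite author's own statement) =====
-- stated objective: alternative
-- what changed: Replaces A's synchronized two-pointer merge over the two sorted filtered lists by a per-reserve neighbor-probing greedy: iterate over the sorted net reserve and lend each reserve student to a lost student numbered r-1 first, else r+1, removing one occurrence from the net-lost list.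
import Mathlib
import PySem

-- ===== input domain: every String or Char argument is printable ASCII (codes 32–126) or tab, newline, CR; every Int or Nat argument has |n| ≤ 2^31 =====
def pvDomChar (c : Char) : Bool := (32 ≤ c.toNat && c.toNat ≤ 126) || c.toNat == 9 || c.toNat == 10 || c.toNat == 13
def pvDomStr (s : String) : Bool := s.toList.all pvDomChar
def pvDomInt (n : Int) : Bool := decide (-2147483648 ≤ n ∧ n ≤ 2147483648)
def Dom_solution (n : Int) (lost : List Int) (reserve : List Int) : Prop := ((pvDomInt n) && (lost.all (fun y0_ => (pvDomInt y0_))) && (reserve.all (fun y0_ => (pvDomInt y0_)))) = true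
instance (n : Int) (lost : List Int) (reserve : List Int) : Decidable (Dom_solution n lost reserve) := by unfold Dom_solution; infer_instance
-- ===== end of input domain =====

-- B replaces A's synchronized two-pointer merge of the two sorted filtered lists by a
-- per-reserve neighbor-probing greedy (lend to r-1 first, else r+1); objective: alternative.

-- ===== PORT A =====
-- A's while loop over indices p1, p2; fuel = |L| + |R| only makes the recursion total
-- (each iteration increases p1 + p2, so the loop runs at most |L| + |R| - 1 times).
def loopA (L R : List Int) (fuel p1 p2 : Nat) (saved : Int) : Int :=
  match fuel with
  | 0 => saved
  | fuel + 1 =>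
    if h1 : p1 < L.length then
      if h2 : p2 < R.length then
        if (L[p1] - R[p2]).natAbs ≤ 1 then loopA L R fuel (p1 + 1) (p2 + 1) (saved + 1)
        else if L[p1] > R[p2] then loopA L R fuel p1 (p2 + 1) saved
        else loopA L R fuel (p1 + 1) p2 saved
      else saved
    else saved

def solution (n : Int) (lost : List Int) (reserve : List Int) : Int :=
  let netLost := PySem.List.sorted (lost.filter fun i => decide (i ∉ reserve)) (fun x => x) false
  let netReserve := PySem.List.sorted (reserve.filter fun i => decide (i ∉ lost)) (fun x => x) false
  n - netLost.length + loopA netLost netReserve (netLost.length + netReserve.length) 0 0 0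

-- ===== PORT B =====
-- B's for-loop over the sorted net reserve; M is the mutable net_lost list (list.remove =
-- remove first occurrence, always guarded by the membership test, hence the .getD M).
def loopB (rs M : List Int) (saved : Int) : Int :=
  match rs with
  | [] => saved
  | r :: rs =>
    if (r - 1) ∈ M then loopB rs ((PySem.List.remove? M (r - 1)).getD M) (saved + 1)
    else if (r + 1) ∈ M then loopB rs ((PySem.List.remove? M (r + 1)).getD M) (saved + 1)
    else loopB rs M saved

def solution_alt (n : Int) (lost : List Int) (reserve : List Int) : Int :=
  let netLost := PySem.List.sorted (lost.filter fun i => decide (i ∉ reserve)) (fun x => x) false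
  let netReserve := PySem.List.sorted (reserve.filter fun i => decide (i ∉ lost)) (fun x => x) false
  n - netLost.length + loopB netReserve netLost 0

-- ===== PRECONDITION & SPEC =====
def Spec_solution (n : Int) (lost : List Int) (reserve : List Int) (out : Int) : Prop := out = solution_alt n lost reserve
instance (n : Int) (lost : List Int) (reserve : List Int) (out : Int) : Decidable (Spec_solution n lost reserve out) := by unfold Spec_solution; infer_instance

-- ===== CLAIM (what is proved, stated in full; the proofs are below) =====
def Claim_equal_solution : Prop := ∀ (n : Int) (lost : List Int) (reserve : List Int), Dom_solution n lost reserve → Spec_solution n lost reserve (solution n lost reserve)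

-- ===== LEMMAS AND PROOFS =====

-- Proof-side recursive form of A's two-pointer greedy.
def g : List Int → List Int → Int
  | [], _ => 0
  | _ :: _, [] => 0
  | l :: L, r :: R =>
    if (l - r).natAbs ≤ 1 then 1 + g L R
    else if l > r then g (l :: L) R
    else g L (r :: R)
  termination_by L R => L.length + R.length

theorem g_nil_right (L : List Int) : g L [] = 0 := by cases L <;> simp [g]

theorem g_cons (l r : Int) (L R : List Int) :
    g (l :: L) (r :: R) =
      if (l - r).natAbs ≤ 1 then 1 + g L R
      else if l > r then g (l :: L) R
      else g L (r :: R) := by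
  rw [g]

theorem loopA_eq (L R : List Int) (fuel p1 p2 : Nat) (saved : Int)
    (hf : (L.length - p1) + (R.length - p2) ≤ fuel) :
    loopA L R fuel p1 p2 saved = saved + g (L.drop p1) (R.drop p2) := by
  induction fuel generalizing p1 p2 saved with
  | zero =>
    have h1 : L.length ≤ p1 := by omega
    simp [loopA, List.drop_eq_nil_of_le h1, g]
  | succ fuel ih =>
    by_cases h1 : p1 < L.length
    · by_cases h2 : p2 < R.length
      · have hdL : L.drop p1 = L[p1] :: L.drop (p1 + 1) := List.drop_eq_getElem_cons h1
        have hdR : R.drop p2 = R[p2] :: R.drop (p2 + 1) := List.drop_eq_getElem_cons h2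
        rw [hdL, hdR, g_cons]
        simp only [loopA, dif_pos h1, dif_pos h2]
        by_cases hc : (L[p1] - R[p2]).natAbs ≤ 1
        · rw [if_pos hc, if_pos hc, ih _ _ _ (by omega)]
          omega
        · rw [if_neg hc, if_neg hc]
          by_cases hgt : L[p1] > R[p2]
          · rw [if_pos hgt, if_pos hgt, ih _ _ _ (by omega), hdL]
          · rw [if_neg hgt, if_neg hgt, ih _ _ _ (by omega), hdR]
      · simp [loopA, h1, h2, List.drop_eq_nil_of_le (by omega : R.length ≤ p2), g_nil_right]
    · simp [loopA, h1, List.drop_eq_nil_of_le (by omega : L.length ≤ p1), g]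

-- An element strictly smaller than r - 1 for every r in rs is invisible to loopB.
theorem loopB_skip (rs : List Int) (M : List Int) (s x : Int)
    (hx : ∀ r ∈ rs, x + 1 < r) :
    loopB rs (x :: M) s = loopB rs M s := by
  induction rs generalizing M s with
  | nil => rfl
  | cons r rs ih =>
    have hr : x + 1 < r := hx r (List.mem_cons_self ..)
    have h1 : r - 1 ≠ x := by omega
    have h2 : r + 1 ≠ x := by omega
    have hrest : ∀ r' ∈ rs, x + 1 < r' := fun r' h => hx r' (List.mem_cons_of_mem _ h)
    simp only [loopB, List.mem_cons, h1, h2, false_or]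
    by_cases hm1 : (r - 1) ∈ M
    · obtain ⟨M', hM'⟩ : ∃ M', PySem.List.remove? M (r - 1) = some M' :=
        Option.ne_none_iff_exists'.mp (by simp [PySem.List.remove?_eq_none_iff, hm1])
      simp only [hm1, if_true]
      rw [PySem.List.remove?_cons_of_ne M (by omega), hM']
      simp only [Option.map_some, Option.getD_some]
      exact ih _ _ hrest
    · by_cases hm2 : (r + 1) ∈ M
      · obtain ⟨M', hM'⟩ : ∃ M', PySem.List.remove? M (r + 1) = some M' :=
          Option.ne_none_iff_exists'.mp (by simp [PySem.List.remove?_eq_none_iff, hm2])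
        simp only [hm1, hm2, if_true, if_false]
        rw [PySem.List.remove?_cons_of_ne M (by omega), hM']
        simp only [Option.map_some, Option.getD_some]
        exact ih _ _ hrest
      · simp only [hm1, hm2, if_false]
        exact ih _ _ hrest

-- Core: on sorted, value-disjoint lists the two greedies agree.
theorem loopB_eq_g (m : Nat) : ∀ (L R : List Int) (s : Int), L.length + R.length ≤ m →
    L.Pairwise (· ≤ ·) → R.Pairwise (· ≤ ·) → (∀ x ∈ L, x ∉ R) →
    loopB R L s = s + g L R := by
  induction m with
  | zero =>
    intro L R s hm _ _ _
    have hL : L = [] := List.eq_nil_of_length_eq_zero (by omega)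
    have hR : R = [] := List.eq_nil_of_length_eq_zero (by omega)
    subst hL; subst hR; simp [loopB, g]
  | succ m ih =>
    intro L R s hm hL hR hdisj
    match R with
    | [] => simp [loopB, g_nil_right]
    | r :: rT =>
      match L with
      | [] =>
        rw [show loopB (r :: rT) [] s = loopB rT [] s by simp [loopB]]
        rw [ih [] rT s (by simp at hm ⊢; omega) List.Pairwise.nil hR.of_cons (by simp)]
        simp [g]
      | l :: L' =>
        have hlL' : ∀ y ∈ L', l ≤ y := fun y hy => (List.pairwise_cons.mp hL).1 y hy
        have hrR : ∀ y ∈ rT, r ≤ y := fun y hy => (List.pairwise_cons.mp hR).1 y hy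
        have hlr : l ≠ r := fun h => hdisj l (List.mem_cons_self ..) (h ▸ List.mem_cons_self ..)
        have hmm : L'.length + rT.length ≤ m := by simp at hm; omega
        have hdisj' : ∀ x ∈ L', x ∉ rT := fun x hx hxR =>
          hdisj x (List.mem_cons_of_mem _ hx) (List.mem_cons_of_mem _ hxR)
        have hdisjL' : ∀ x ∈ L', x ∉ r :: rT := fun x hx =>
          hdisj x (List.mem_cons_of_mem _ hx)
        by_cases hc : (l - r).natAbs ≤ 1
        · rcases (by omega : l = r - 1 ∨ l = r + 1) with h | h
          · -- l = r - 1: B lends r to l immediately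
            subst h
            rw [show loopB (r :: rT) ((r - 1) :: L') s = loopB rT L' (s + 1) by
              simp only [loopB, if_pos (List.mem_cons_self (a := r - 1) (l := L')),
                PySem.List.remove?_cons_self, Option.getD_some]]
            rw [ih L' rT (s + 1) hmm hL.of_cons hR.of_cons hdisj', g_cons, if_pos hc]
            omega
          · -- l = r + 1: r - 1 is below every element of M, so the r + 1 probe fires
            subst h
            have hnm1 : (r - 1) ∉ (r + 1) :: L' := by
              intro hmem
              rcases List.mem_cons.mp hmem with h1 | h1
              · omega
              · have := hlL' _ h1; omega
            rw [show loopB (r :: rT) ((r + 1) :: L') s = loopB rT L' (s + 1) by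
              simp only [loopB, if_neg hnm1, if_pos (List.mem_cons_self (a := r + 1) (l := L')),
                PySem.List.remove?_cons_self, Option.getD_some]]
            rw [ih L' rT (s + 1) hmm hL.of_cons hR.of_cons hdisj', g_cons, if_pos hc]
            omega
        · rcases (by omega : l + 1 < r ∨ r + 1 < l) with h | h
          · -- l < r - 1: l can never be lent to; drop it from M
            have hskip : ∀ r' ∈ r :: rT, l + 1 < r' := by
              intro r' hr'
              rcases List.mem_cons.mp hr' with h1 | h1
              · omega
              · have := hrR _ h1; omega
            rw [loopB_skip _ _ _ _ hskip]
            rw [ih L' (r :: rT) s (by simp at hm ⊢; omega) hL.of_cons hR hdisjL']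
            rw [g_cons, if_neg hc, if_neg (by omega : ¬ l > r)]
          · -- l > r + 1: r matches nothing in M; B skips it, A advances p2
            have hnm1 : (r - 1) ∉ l :: L' := by
              intro hmem
              rcases List.mem_cons.mp hmem with h1 | h1
              · omega
              · have := hlL' _ h1; omega
            have hnm2 : (r + 1) ∉ l :: L' := by
              intro hmem
              rcases List.mem_cons.mp hmem with h1 | h1
              · omega
              · have := hlL' _ h1; omega
            rw [show loopB (r :: rT) (l :: L') s = loopB rT (l :: L') s by
              simp only [loopB, if_neg hnm1, if_neg hnm2]]
            rw [ih (l :: L') rT s (by simp at hm ⊢; omega) hL hR.of_cons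
              (fun x hx hxR => hdisj x hx (List.mem_cons_of_mem _ hxR))]
            rw [g_cons, if_neg hc, if_pos (by omega : l > r)]

-- ===== VERDICT (by name: the statement is the Claim_ definition above) =====
theorem solution_spec : Claim_equal_solution := by
  intro n lost reserve _
  unfold Spec_solution solution solution_alt
  simp only []
  set L := PySem.List.sorted (lost.filter fun i => decide (i ∉ reserve)) (fun x => x) false with hLdef
  set R := PySem.List.sorted (reserve.filter fun i => decide (i ∉ lost)) (fun x => x) false with hRdef
  have hLp : L.Pairwise (· ≤ ·) := PySem.List.sorted_pairwise ..
  have hRp : R.Pairwise (· ≤ ·) := PySem.List.sorted_pairwise ..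
  have hdisj : ∀ x ∈ L, x ∉ R := by
    intro x hx hxR
    rw [hLdef, PySem.List.mem_sorted, List.mem_filter] at hx
    rw [hRdef, PySem.List.mem_sorted, List.mem_filter] at hxR
    exact (by simpa using hx.2 : x ∉ reserve) (hxR.1)
  rw [loopA_eq L R (L.length + R.length) 0 0 0 (by omega)]
  rw [loopB_eq_g (L.length + R.length) L R 0 (le_refl _) hLp hRp hdisj]
  simp
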